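-- pv_equiv track=rewrite | github.com/LamPhamm/mazeFinder | MazeFinderAlgorithm.py | x_reached
-- ===== SOURCE A (Python) =====
-- def x_reached(maze,path):
--     current_pos=find_O_position(maze)
--     X_pos=find_X_position(maze)
--
--     #Convert the path string into a list
--     path_list=list(path)
--
--     #Check if the path is empty, then the X hasn't been reached
--     if len(path_list)==0:
--         return False
--
--     for move in path_list:
--         #Depending on the move in the path, update the current position
--         if move=="L":
--             current_pos=[current_pos[0],current_pos[1]-1]
--         elif move=="R":
--             current_pos=[current_pos[0],current_pos[1]+1]
--         elif move=="U":
--             current_pos=[current_pos[0]-1,current_pos[1]]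
--         else:
--             current_pos=[current_pos[0]+1,current_pos[1]]
--
--     #Determine if the X_pos has been reached
--     if current_pos==X_pos:
--         return True
--     return False
--
-- def find_O_position(maze):
--     for row_index in range(len(maze)):
--         for col_index in range(len(maze[row_index])):
--             if maze[row_index][col_index]=="O":
--                 O_pos=[row_index,col_index]
--
--     return O_pos
--
-- def find_X_position(maze):
--     for row_index in range(len(maze)):
--         for col_index in range(len(maze[row_index])):
--             if maze[row_index][col_index]=="X":
--                 X_pos=[row_index,col_index]
--
--     return X_pos
-- ===== SOURCE B (Python) =====
-- def x_reached(maze, path):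
--     current_pos = _last_marker_pos(maze, "O")
--     X_pos = _last_marker_pos(maze, "X")
--     if len(path) == 0:
--         return False
--     countL = sum(1 for ch in path if ch == "L")
--     countR = sum(1 for ch in path if ch == "R")
--     countU = sum(1 for ch in path if ch == "U")
--     countD = len(path) - countL - countR - countU  # every non-L/R/U move is "down"
--     return [current_pos[0] - countU + countD, current_pos[1] - countL + countR] == X_pos
--
-- def _last_marker_pos(maze, marker):
--     # last occurrence, as in A's finders (raises if the marker is absent, like A's UnboundLocalError)
--     return [[r, c] for r, row in enumerate(maze) for c, v in enumerate(row) if v == marker][-1]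
-- ===== Notes on version B (the rewrite author's own statement) =====
-- stated objective: alternative
-- what changed: Replaces A's nested-loop position finders and move-by-move simulation with comprehensions taking the last marker occurrence and a closed-form final position computed from character counts (countD derived as len(path)-L-R-U).
import Mathlib
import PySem

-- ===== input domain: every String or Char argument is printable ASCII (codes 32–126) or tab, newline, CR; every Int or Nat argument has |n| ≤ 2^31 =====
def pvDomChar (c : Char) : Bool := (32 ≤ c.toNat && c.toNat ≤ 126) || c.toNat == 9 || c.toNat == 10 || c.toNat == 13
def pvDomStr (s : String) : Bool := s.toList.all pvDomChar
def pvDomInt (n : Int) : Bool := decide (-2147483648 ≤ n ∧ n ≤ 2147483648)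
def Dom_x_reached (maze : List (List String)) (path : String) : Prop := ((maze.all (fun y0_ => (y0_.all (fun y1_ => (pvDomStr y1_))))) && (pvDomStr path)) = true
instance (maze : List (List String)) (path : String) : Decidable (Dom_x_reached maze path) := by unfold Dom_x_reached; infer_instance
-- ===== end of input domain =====

-- B replaces A's move-by-move simulation with a closed-form final position computed from
-- per-direction move counts, and the nested-loop finders with last-of-comprehension lookups
-- (objective: alternative, same asymptotic cost).

-- ===== PORT A =====
-- A's find_O_position / find_X_position: nested index loops keeping the LAST match;
-- `none` stands for Python's unassigned local (UnboundLocalError), excluded by Pre_.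
def find_O_position (maze : List (List String)) : Option (Int × Int) :=
  (PySem.List.enumerate maze).foldl
    (fun acc rr =>
      (PySem.List.enumerate rr.2).foldl
        (fun acc2 cc => if cc.2 == "O" then some (rr.1, cc.1) else acc2) acc)
    none

def find_X_position (maze : List (List String)) : Option (Int × Int) :=
  (PySem.List.enumerate maze).foldl
    (fun acc rr =>
      (PySem.List.enumerate rr.2).foldl
        (fun acc2 cc => if cc.2 == "X" then some (rr.1, cc.1) else acc2) acc)
    none

def x_reached (maze : List (List String)) (path : String) : Bool :=
  match find_O_position maze, find_X_position maze with
  | some current_pos, some X_pos =>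
    let path_list := path.toList
    if path_list.length == 0 then false
    else
      let final := path_list.foldl
        (fun (p : Int × Int) move =>
          if move == 'L' then (p.1, p.2 - 1)
          else if move == 'R' then (p.1, p.2 + 1)
          else if move == 'U' then (p.1 - 1, p.2)
          else (p.1 + 1, p.2)) current_pos
      final == X_pos
  | _, _ => false  -- Python raises UnboundLocalError here; excluded by Pre_

-- ===== PORT B =====
-- B's _last_marker_pos: last element of the comprehension of marker positions.
def lastMarkerPos (maze : List (List String)) (marker : String) : Option (Int × Int) :=
  ((PySem.List.enumerate maze).flatMap (fun rr =>
    (PySem.List.enumerate rr.2).filterMap (fun cc =>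
      if cc.2 == marker then some (rr.1, cc.1) else none))).getLast?

def x_reached_alt (maze : List (List String)) (path : String) : Bool :=
  match lastMarkerPos maze "O" with
  | none => false  -- Python raises IndexError here, outside Pre_
  | some current_pos =>
    match lastMarkerPos maze "X" with
    | none => false  -- Python raises IndexError here, outside Pre_
    | some X_pos =>
      if path.toList.length == 0 then false
      else
        let countL := ((path.toList.map (fun ch => if ch == 'L' then (1:Int) else 0)).sum)
        let countR := ((path.toList.map (fun ch => if ch == 'R' then (1:Int) else 0)).sum)
        let countU := ((path.toList.map (fun ch => if ch == 'U' then (1:Int) else 0)).sum)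
        let countD := (path.toList.length : Int) - countL - countR - countU
        ((current_pos.1 - countU + countD, current_pos.2 - countL + countR) : Int × Int) == X_pos

-- ===== PRECONDITION & SPEC =====
-- Pre_ excludes mazes containing no "O" cell or no "X" cell, on which A raises UnboundLocalError.
def Pre_x_reached (maze : List (List String)) (path : String) : Prop :=
  (maze.any (fun row => row.any (fun c => c == "O"))) = true ∧
  (maze.any (fun row => row.any (fun c => c == "X"))) = true
instance (maze : List (List String)) (path : String) : Decidable (Pre_x_reached maze path) := by
  unfold Pre_x_reached; infer_instance

def pvWitness_x_reached : List (List String) × String := ([["O", "X"]], "R")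

def Spec_x_reached (maze : List (List String)) (path : String) (out : Bool) : Prop := out = x_reached_alt maze path
instance (maze : List (List String)) (path : String) (out : Bool) : Decidable (Spec_x_reached maze path out) := by unfold Spec_x_reached; infer_instance

-- ===== CLAIM (what is proved, stated in full; the proofs are below) =====
def Claim_equal_x_reached : Prop := ∀ (maze : List (List String)) (path : String), Dom_x_reached maze path → Pre_x_reached maze path → Spec_x_reached maze path (x_reached maze path)

-- ===== LEMMAS AND PROOFS =====

theorem getLast?_cons_or {β : Type} (b : β) (xs : List β) :
    (b :: xs).getLast? = xs.getLast?.or (some b) := by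
  cases xs with
  | nil => simp
  | cons x xs =>
    rw [List.getLast?_cons_cons]
    have h : (x :: xs).getLast?.isSome := by
      simp [List.getLast?_isSome]
    cases hh : (x :: xs).getLast? with
    | none => rw [hh] at h; simp at h
    | some v => simp

theorem foldl_if_last {α β : Type} (l : List α) (p : α → Bool) (g : α → β) (init : Option β) :
    l.foldl (fun acc a => if p a then some (g a) else acc) init
      = ((l.filterMap (fun a => if p a then some (g a) else none)).getLast?).or init := by
  induction l generalizing init with
  | nil => simp
  | cons a l ih =>
    simp only [List.foldl_cons, List.filterMap_cons]
    by_cases h : p a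
    · simp only [h, if_pos]
      rw [ih, getLast?_cons_or, Option.or_assoc, Option.some_or]
    · simp only [h, if_neg, Bool.false_eq_true, not_false_iff]
      exact ih init

theorem foldl_or_last {α β : Type} (l : List α) (h : α → Option β) (init : Option β) :
    l.foldl (fun acc a => (h a).or acc) init = ((l.filterMap h).getLast?).or init := by
  induction l generalizing init with
  | nil => simp
  | cons a l ih =>
    simp only [List.foldl_cons, List.filterMap_cons]
    cases hh : h a with
    | none => simp [ih]
    | some b =>
      rw [Option.some_or, ih, getLast?_cons_or, Option.or_assoc, Option.some_or]

theorem getLast?_append_or {β : Type} (xs ys : List β) :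
    (xs ++ ys).getLast? = ys.getLast?.or xs.getLast? := by
  induction xs with
  | nil => simp
  | cons x xs ih =>
    rw [List.cons_append, getLast?_cons_or, ih, getLast?_cons_or, Option.or_assoc]

theorem getLast?_flatMap_filterMap {α β : Type} (l : List α) (g : α → List β) :
    (l.flatMap g).getLast? = (l.filterMap (fun a => (g a).getLast?)).getLast? := by
  induction l with
  | nil => simp
  | cons a l ih =>
    rw [List.flatMap_cons, getLast?_append_or, ih, List.filterMap_cons]
    cases hg : (g a).getLast? with
    | none => simp
    | some b => rw [getLast?_cons_or]

-- A's finder computes the same Option as B's last-of-comprehension lookup.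
theorem finder_O_eq (maze : List (List String)) :
    find_O_position maze = lastMarkerPos maze "O" := by
  unfold find_O_position lastMarkerPos
  have hbody : (fun (acc : Option (Int × Int)) (rr : Int × List String) =>
      (PySem.List.enumerate rr.2).foldl
        (fun acc2 cc => if cc.2 == "O" then some (rr.1, cc.1) else acc2) acc)
      = (fun acc rr =>
      (((PySem.List.enumerate rr.2).filterMap
        (fun cc => if cc.2 == "O" then some (rr.1, cc.1) else none)).getLast?).or acc) := by
    funext acc rr
    exact foldl_if_last (PySem.List.enumerate rr.2)
      (fun cc => cc.2 == "O") (fun cc => (rr.1, cc.1)) acc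
  rw [hbody, foldl_or_last, getLast?_flatMap_filterMap]
  simp

theorem finder_X_eq (maze : List (List String)) :
    find_X_position maze = lastMarkerPos maze "X" := by
  unfold find_X_position lastMarkerPos
  have hbody : (fun (acc : Option (Int × Int)) (rr : Int × List String) =>
      (PySem.List.enumerate rr.2).foldl
        (fun acc2 cc => if cc.2 == "X" then some (rr.1, cc.1) else acc2) acc)
      = (fun acc rr =>
      (((PySem.List.enumerate rr.2).filterMap
        (fun cc => if cc.2 == "X" then some (rr.1, cc.1) else none)).getLast?).or acc) := by
    funext acc rr
    exact foldl_if_last (PySem.List.enumerate rr.2)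
      (fun cc => cc.2 == "X") (fun cc => (rr.1, cc.1)) acc
  rw [hbody, foldl_or_last, getLast?_flatMap_filterMap]
  simp

-- A's move loop admits a closed form in terms of per-direction counts.
theorem move_fold (ms : List Char) (p : Int × Int) :
    ms.foldl (fun (q : Int × Int) move =>
        if move == 'L' then (q.1, q.2 - 1)
        else if move == 'R' then (q.1, q.2 + 1)
        else if move == 'U' then (q.1 - 1, q.2)
        else (q.1 + 1, q.2)) p
      = (p.1 - (ms.count 'U' : Int)
            + ((ms.length : Int) - ms.count 'L' - ms.count 'R' - ms.count 'U'),
         p.2 - (ms.count 'L' : Int) + ms.count 'R') := by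
  induction ms generalizing p with
  | nil => simp
  | cons m ms ih =>
    simp only [List.foldl_cons, List.count_cons, List.length_cons]
    rw [ih]
    by_cases hL : m = 'L' <;> by_cases hR : m = 'R' <;> by_cases hU : m = 'U' <;>
      simp [hL, hR, hU, Prod.ext_iff] <;> omega

-- ===== VERDICT (by name: the statement is the Claim_ definition above) =====
theorem x_reached_spec : Claim_equal_x_reached := by
  intro maze path _ _
  unfold Spec_x_reached x_reached x_reached_alt
  rw [finder_O_eq, finder_X_eq]
  cases hO : lastMarkerPos maze "O" with
  | none => rfl
  | some o =>
    cases hX : lastMarkerPos maze "X" with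
    | none => rfl
    | some x =>
      by_cases hnil : path.toList = []
      · simp [hnil]
      · have hc1 : ¬ ((path.toList.length == 0) = true) := by
          intro h
          exact hnil (List.length_eq_zero_iff.mp (by simpa using h))
        simp only [if_neg hc1]
        rw [move_fold]
        congr 1
        have hc : ∀ (c : Char),
            ((path.toList.map (fun ch => if ch == c then (1:Int) else 0)).sum)
              = (path.toList.count c : Int) := by
          intro c
          rw [PySem.List.sum_map_ite_one_zero]
          simp [List.count]
        rw [hc 'L', hc 'R', hc 'U']
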